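-- pv_equiv track=rewrite | github.com/collinsakenga/codewars_solutions | 6 kyu/6 kyu_String tops.py | tops
-- ===== SOURCE A (Python) =====
-- def tops(msg):
--     res = []
--     total = 2
--     count = 2
--     string = ""
--     while total <= len(msg):
--         res.append(total)
--         total += 2*count+1
--         count += 2
--     return "".join(msg[i-1] for i in res)[::-1]
-- ===== SOURCE B (Python) =====
-- def _is_top(i):
--     n = 1
--     while n * (2 * n - 1) < i:
--         n += 1
--     return n * (2 * n - 1) == i
--
--
-- def tops(msg):
--     out = ""
--     for i, ch in enumerate(msg):
--         if _is_top(i):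
--             out = ch + out
--     return out
-- ===== Notes on version B (the rewrite author's own statement) =====
-- stated objective: alternative
-- what changed: Instead of generating the sparse position list with running accumulators, indexing into msg and reversing at the end, B scans every character of msg once with enumerate, tests each index with a standalone membership predicate _is_top (is this index of the form n*(2n-1)?), and builds the reversed result directly by prepending.
import Mathlib
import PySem

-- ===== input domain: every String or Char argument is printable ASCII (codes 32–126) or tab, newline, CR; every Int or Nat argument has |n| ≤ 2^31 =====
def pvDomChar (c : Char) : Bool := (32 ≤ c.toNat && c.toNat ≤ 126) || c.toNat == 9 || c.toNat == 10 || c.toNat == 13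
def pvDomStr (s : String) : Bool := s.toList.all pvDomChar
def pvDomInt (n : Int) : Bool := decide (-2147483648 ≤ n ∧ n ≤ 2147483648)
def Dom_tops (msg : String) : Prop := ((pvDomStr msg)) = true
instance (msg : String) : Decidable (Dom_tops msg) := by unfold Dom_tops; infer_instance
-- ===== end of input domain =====

-- B scans every character once and tests each index with a membership predicate,
-- building the reversed string by prepending (objective: alternative; not faster).

-- ===== PORT A =====
-- A's while loop collecting `total`; fuel bounds the iterations (total grows each
-- step, so length + 1 steps always suffice); fuel only makes the loop total.
def topsLoopA (len total count : Int) (fuel : Nat) : List Int :=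
  match fuel with
  | 0 => []
  | f + 1 =>
    if total ≤ len then total :: topsLoopA len (total + (2 * count + 1)) (count + 2) f
    else []

def tops (msg : String) : String :=
  let m := msg.toList
  let res := topsLoopA (m.length : Int) 2 2 (m.length + 1)
  -- "".join(msg[i-1] for i in res)[::-1]; every i-1 is in range, getD is never hit
  String.ofList ((res.map (fun i => (PySem.List.pyGet? m (i - 1)).getD ' ')).reverse)

-- ===== PORT B =====
-- _is_top's while loop; fuel = i.toNat + 1 always suffices (n grows past i)
def topsIsTopGo (i n : Int) (fuel : Nat) : Bool :=
  match fuel with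
  | 0 => false
  | f + 1 =>
    if n * (2 * n - 1) < i then topsIsTopGo i (n + 1) f else n * (2 * n - 1) == i

def topsIsTop (i : Int) : Bool := topsIsTopGo i 1 (i.toNat + 1)

-- for i, ch in enumerate(msg): if _is_top(i): out = ch + out
def tops_alt (msg : String) : String :=
  String.ofList ((PySem.List.enumerate msg.toList).foldl
    (fun out p => if topsIsTop p.1 then p.2 :: out else out) [])

-- ===== PRECONDITION & SPEC =====
def Spec_tops (msg : String) (out : String) : Prop := out = tops_alt msg
instance (msg : String) (out : String) : Decidable (Spec_tops msg out) := by unfold Spec_tops; infer_instance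

-- ===== CLAIM (what is proved, stated in full; the proofs are below) =====
def Claim_equal_tops : Prop := ∀ (msg : String), Dom_tops msg → Spec_tops msg (tops msg)

-- ===== LEMMAS AND PROOFS =====

-- canonical generation loop: collect m[n*(2n-1)] for n = 1, 2, … while in range
def genB (m : List Char) (n : Nat) : List Char :=
  if h : n * (2 * n - 1) < m.length then m[n * (2 * n - 1)] :: genB m (n + 1) else []
termination_by m.length - n
decreasing_by
  rcases Nat.eq_zero_or_pos n with h0 | h0
  · subst h0; simp at h; omega
  · have : n ≤ n * (2 * n - 1) := Nat.le_mul_of_pos_right n (by omega)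
    omega

-- _is_top returns true exactly on the positions n*(2n-1), n ≥ 1
lemma topsIsTopGo_iff : ∀ (fuel : Nat) (i n : Nat), 1 ≤ n → i < n + fuel →
    (topsIsTopGo (i : Int) (n : Int) fuel = true ↔ ∃ j : Nat, n ≤ j ∧ j * (2 * j - 1) = i) := by
  intro fuel
  induction fuel with
  | zero =>
    intro i n hn h
    simp only [topsIsTopGo, Bool.false_eq_true, false_iff]
    rintro ⟨j, hj, hje⟩
    have h1 : j ≤ j * (2 * j - 1) := Nat.le_mul_of_pos_right j (by omega)
    omega
  | succ f ih =>
    intro i n hn h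
    have hcast : (n : Int) * (2 * n - 1) = ((n * (2 * n - 1) : Nat) : Int) := by
      push_cast [Nat.cast_sub (by omega : 1 ≤ 2 * n)]; ring
    simp only [topsIsTopGo]
    by_cases hlt : n * (2 * n - 1) < i
    · rw [if_pos (by rw [hcast]; exact_mod_cast hlt)]
      have hni : n < i := by
        have : n ≤ n * (2 * n - 1) := Nat.le_mul_of_pos_right n (by omega)
        omega
      have hrw : (n : Int) + 1 = ((n + 1 : Nat) : Int) := by push_cast; ring
      rw [hrw, ih i (n + 1) (by omega) (by omega)]
      constructor
      · rintro ⟨j, hj, hje⟩; exact ⟨j, by omega, hje⟩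
      · rintro ⟨j, hj, hje⟩
        refine ⟨j, ?_, hje⟩
        rcases Nat.lt_or_ge n j with h' | h'
        · omega
        · have : n = j := by omega
          subst this; omega
    · rw [if_neg (by rw [hcast]; exact_mod_cast hlt)]
      rw [hcast]
      constructor
      · intro he
        have : n * (2 * n - 1) = i := by exact_mod_cast (by simpa using he : ((n * (2 * n - 1) : Nat) : Int) = (i : Int))
        exact ⟨n, le_refl n, this⟩
      · rintro ⟨j, hj, hje⟩
        have hmono : n * (2 * n - 1) ≤ j * (2 * j - 1) :=
          Nat.mul_le_mul hj (by omega)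
        have : n * (2 * n - 1) = i := by omega
        simp [this]

lemma topsIsTop_iff (i : Nat) :
    topsIsTop (i : Int) = true ↔ ∃ j : Nat, 1 ≤ j ∧ j * (2 * j - 1) = i := by
  have := topsIsTopGo_iff (i + 1) i 1 (le_refl 1) (by omega)
  simpa [topsIsTop] using this

-- B's fold with a prepending accumulator is reverse ∘ map snd ∘ filter
lemma fold_prepend (l : List (Int × Char)) (acc : List Char) :
    l.foldl (fun out p => if topsIsTop p.1 then p.2 :: out else out) acc
      = ((l.filter (fun p => topsIsTop p.1)).map Prod.snd).reverse ++ acc := by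
  induction l generalizing acc with
  | nil => simp
  | cons x xs ih =>
    simp only [List.foldl_cons, List.filter_cons]
    by_cases hx : topsIsTop x.1
    · simp [hx, ih]
    · simp [hx, ih]

-- appending one character extends genB by it iff its index is a top position
lemma genB_append_pos (m : List Char) (c : Char) :
    ∀ (d n j : Nat), n + d = j → j * (2 * j - 1) = m.length →
      genB (m ++ [c]) n = genB m n ++ [c] := by
  intro d
  induction d with
  | zero =>
    intro n j hnj hlen
    have hj : n = j := by omega
    subst hj
    have h1 : n * (2 * n - 1) < (m ++ [c]).length := by
      simp [List.length_append]; omega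
    conv_lhs => rw [genB]
    conv_rhs => rw [genB]
    rw [dif_pos h1]
    rw [dif_neg (by omega : ¬ n * (2 * n - 1) < m.length)]
    have hnext : ¬ (n + 1) * (2 * (n + 1) - 1) < (m ++ [c]).length := by
      simp only [List.length_append, List.length_cons, List.length_nil]
      have h2 : n * (2 * n - 1) < (n + 1) * (2 * (n + 1) - 1) := by
        rcases Nat.eq_zero_or_pos n with h0 | h0
        · subst h0; simp
        · have : 2 * n - 1 < 2 * (n + 1) - 1 := by omega
          calc n * (2 * n - 1) < (n + 1) * (2 * n - 1) + 1 := by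
                have := Nat.mul_le_mul (by omega : n ≤ n + 1) (le_refl (2 * n - 1)); omega
            _ ≤ (n + 1) * (2 * (n + 1) - 1) := by
                have := Nat.mul_le_mul (le_refl (n + 1)) (by omega : 2 * n - 1 + 1 ≤ 2 * (n + 1) - 1)
                have h3 : (n + 1) * (2 * n - 1 + 1) = (n + 1) * (2 * n - 1) + (n + 1) := by ring
                omega
      omega
    conv_lhs => rw [genB]
    rw [dif_neg hnext]
    have : (m ++ [c])[n * (2 * n - 1)]'h1 = c := by
      rw [List.getElem_append_right (by omega)]
      simp [hlen]
    simp [this]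
  | succ d ih =>
    intro n j hnj hlen
    have hjpos : 1 ≤ j := by
      by_contra h'
      have : j = 0 := by omega
      omega
    have hlt : n * (2 * n - 1) < m.length := by
      rcases Nat.eq_zero_or_pos n with h0 | h0
      · subst h0
        have : 1 ≤ j * (2 * j - 1) := by
          have := Nat.mul_le_mul hjpos (by omega : 1 ≤ 2 * j - 1); omega
        simpa using by omega
      · have h1 : n * (2 * n - 1) < j * (2 * j - 1) := by
          have hle : n * (2 * n - 1) ≤ (j - 1) * (2 * j - 1) :=
            Nat.mul_le_mul (by omega) (by omega)
          have : (j - 1) * (2 * j - 1) < j * (2 * j - 1) := by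
            have := Nat.mul_lt_mul_of_lt_of_le (by omega : j - 1 < j)
              (le_refl (2 * j - 1)) (by omega : 0 < 2 * j - 1)
            exact this
          omega
        omega
    have h1 : n * (2 * n - 1) < (m ++ [c]).length := by
      simp [List.length_append]; omega
    conv_lhs => rw [genB]
    conv_rhs => rw [genB]
    rw [dif_pos h1, dif_pos hlt]
    have hget : (m ++ [c])[n * (2 * n - 1)]'h1 = m[n * (2 * n - 1)]'hlt :=
      List.getElem_append_left hlt
    rw [hget, ih (n + 1) j (by omega) hlen]
    simp

lemma genB_append_neg (m : List Char) (c : Char) :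
    ∀ (d n : Nat), m.length ≤ n + d → (∀ j : Nat, n ≤ j → j * (2 * j - 1) ≠ m.length) →
      genB (m ++ [c]) n = genB m n := by
  intro d
  induction d with
  | zero =>
    intro n hlen hno
    have hn0 : 1 ≤ n := by
      by_contra h'
      have hn : n = 0 := by omega
      exact hno 0 (by omega) (by simpa [hn] using by omega)
    have hge : m.length < n * (2 * n - 1) := by
      have h1 : n ≤ n * (2 * n - 1) := Nat.le_mul_of_pos_right n (by omega)
      have h2 : n * (2 * n - 1) ≠ m.length := hno n (le_refl n)
      omega
    conv_lhs => rw [genB]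
    conv_rhs => rw [genB]
    rw [dif_neg (show ¬ n * (2 * n - 1) < (m ++ [c]).length by
      simp only [List.length_append, List.length_cons, List.length_nil]; omega)]
    rw [dif_neg (by omega)]
  | succ d ih =>
    intro n hlen hno
    by_cases hlt : n * (2 * n - 1) < m.length
    · have h1 : n * (2 * n - 1) < (m ++ [c]).length := by
        simp [List.length_append]; omega
      conv_lhs => rw [genB]
      conv_rhs => rw [genB]
      rw [dif_pos h1, dif_pos hlt]
      have hget : (m ++ [c])[n * (2 * n - 1)]'h1 = m[n * (2 * n - 1)]'hlt :=
        List.getElem_append_left hlt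
      have hn1 : n < m.length := by
        have : n ≤ n * (2 * n - 1) ∨ n = 0 := by
          rcases Nat.eq_zero_or_pos n with h0 | h0
          · right; exact h0
          · left; exact Nat.le_mul_of_pos_right n (by omega)
        omega
      rw [hget, ih (n + 1) (by omega) (fun j hj => hno j (by omega))]
    · have hne : n * (2 * n - 1) ≠ m.length := hno n (le_refl n)
      have hn0 : 1 ≤ n := by
        rcases Nat.eq_zero_or_pos n with h0 | h0
        · exfalso
          subst h0
          have h1 : m.length = 0 := by simpa using hlt
          exact hno 0 le_rfl (by simp [h1])
        · exact h0
      have hge : m.length < n * (2 * n - 1) := by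
        have h1 : n ≤ n * (2 * n - 1) := Nat.le_mul_of_pos_right n (by omega)
        omega
      conv_lhs => rw [genB]
      conv_rhs => rw [genB]
      rw [dif_neg (show ¬ n * (2 * n - 1) < (m ++ [c]).length by
        simp only [List.length_append, List.length_cons, List.length_nil]; omega)]
      rw [dif_neg hlt]

-- the scan-and-filter over enumerate produces exactly the generation loop's list
lemma genB_eq_filter : ∀ (m : List Char),
    genB m 1 = ((PySem.List.enumerate m 0).filter (fun p => topsIsTop p.1)).map Prod.snd := by
  intro m
  induction m using List.reverseRecOn with
  | nil => rw [genB]; simp [PySem.List.enumerate_nil]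
  | append_singleton m c ih =>
    rw [PySem.List.enumerate_append]
    simp only [PySem.List.enumerate_cons, PySem.List.enumerate_nil, List.filter_append,
      List.map_append]
    by_cases hx : ∃ j : Nat, 1 ≤ j ∧ j * (2 * j - 1) = m.length
    · obtain ⟨j, hj1, hje⟩ := hx
      rw [genB_append_pos m c (j - 1) 1 j (by omega) hje, ih]
      have htop : topsIsTop ((m.length : Int)) = true := by
        rw [topsIsTop_iff]; exact ⟨j, hj1, hje⟩
      simp [htop]
    · have hno : ∀ j : Nat, 1 ≤ j → j * (2 * j - 1) ≠ m.length := by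
        intro j hj he
        exact hx ⟨j, hj, he⟩
      rw [genB_append_neg m c m.length 1 (by omega) hno, ih]
      have htop : topsIsTop ((m.length : Int)) = false := by
        rw [Bool.eq_false_iff]
        intro h
        obtain ⟨j, hj1, hje⟩ := (topsIsTop_iff m.length).mp h
        exact hno j hj1 hje
      simp [htop]

-- A's loop state for counters n, n+1, … maps through indexing to genB m n
lemma topsLoopA_eq (m : List Char) :
    ∀ (fuel : Nat) (n : Nat), 1 ≤ n → m.length < n + fuel →
      (topsLoopA (m.length : Int) ((n : Int) * (2 * n - 1) + 1) (2 * n) fuel).map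
        (fun i => (PySem.List.pyGet? m (i - 1)).getD ' ')
      = genB m n := by
  intro fuel
  induction fuel with
  | zero =>
    intro n hn hfl
    have : ¬ n * (2 * n - 1) < m.length := by
      have : n ≤ n * (2 * n - 1) := Nat.le_mul_of_pos_right n (by omega)
      omega
    rw [genB, dif_neg this]
    simp [topsLoopA]
  | succ f ih =>
    intro n hn hfl
    have hcast : (n : Int) * (2 * n - 1) = ((n * (2 * n - 1) : Nat) : Int) := by
      push_cast [Nat.cast_sub (by omega : 1 ≤ 2 * n)]; ring
    simp only [topsLoopA]
    rw [genB]
    by_cases h : n * (2 * n - 1) < m.length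
    · rw [if_pos (by rw [hcast]; exact_mod_cast by omega : (n : Int) * (2 * n - 1) + 1 ≤ (m.length : Int))]
      rw [dif_pos h]
      simp only [List.map_cons]
      congr 1
      · have : ((n : Int) * (2 * n - 1) + 1) - 1 = ((n * (2 * n - 1) : Nat) : Int) := by omega
        rw [this, PySem.List.pyGet?_natCast]
        simp [List.getElem?_eq_getElem h]
      · have harg : (n : Int) * (2 * n - 1) + 1 + (2 * (2 * (n : Int)) + 1)
            = ((n + 1 : Nat) : Int) * (2 * (n + 1 : Nat) - 1) + 1 := by push_cast; ring
        have hcnt : 2 * (n : Int) + 2 = 2 * ((n + 1 : Nat) : Int) := by push_cast; ring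
        rw [harg, hcnt]
        exact ih (n + 1) (by omega) (by omega)
    · rw [if_neg (by rw [hcast]; exact_mod_cast by omega : ¬ ((n : Int) * (2 * n - 1) + 1 ≤ (m.length : Int)))]
      rw [dif_neg h]
      simp

-- ===== VERDICT (by name: the statement is the Claim_ definition above) =====
theorem tops_spec : Claim_equal_tops := by
  intro msg _
  unfold Spec_tops tops tops_alt
  have hA := topsLoopA_eq msg.toList (msg.toList.length + 1) 1 (le_refl 1) (by omega)
  norm_num at hA ⊢
  rw [hA, fold_prepend, genB_eq_filter]
  simp
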